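-- pv_equiv track=rewrite | github.com/JoelSchnubel/Factorio-Factory-Builder | z3Solver.py | determine_orientation
-- ===== SOURCE A (Python) =====
-- def determine_orientation(assembler_x, assembler_y, inserter_x, inserter_y):
--
--
--     assembler_boundary = {
--     "left": [(assembler_x - 1, assembler_y + i) for i in range(3)],
--     "right": [(assembler_x + 3, assembler_y + i) for i in range(3)],
--     "up": [(assembler_x + i, assembler_y - 1) for i in range(3)],
--     "down": [(assembler_x + i, assembler_y + 3) for i in range(3)]
--     }
--
--     # Check which side the inserter is adjacent to
--     for direction, positions in assembler_boundary.items():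
--         if (inserter_x, inserter_y) in positions:
--             return direction
--     return None  # Inserter is not adjacent
-- ===== SOURCE B (Python) =====
-- def determine_orientation(assembler_x, assembler_y, inserter_x, inserter_y):
--     dx = inserter_x - assembler_x
--     dy = inserter_y - assembler_y
--     if dx == -1 and 0 <= dy <= 2:
--         return "left"
--     if dx == 3 and 0 <= dy <= 2:
--         return "right"
--     if dy == -1 and 0 <= dx <= 2:
--         return "up"
--     if dy == 3 and 0 <= dx <= 2:
--         return "down"
--     return None
-- ===== Notes on version B (the rewrite author's own statement) =====
-- stated objective: simpler
-- what changed: Replaces the dict of three-element boundary coordinate lists and the membership scan with direct arithmetic on the offsets dx, dy and four range checks.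
import Mathlib
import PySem

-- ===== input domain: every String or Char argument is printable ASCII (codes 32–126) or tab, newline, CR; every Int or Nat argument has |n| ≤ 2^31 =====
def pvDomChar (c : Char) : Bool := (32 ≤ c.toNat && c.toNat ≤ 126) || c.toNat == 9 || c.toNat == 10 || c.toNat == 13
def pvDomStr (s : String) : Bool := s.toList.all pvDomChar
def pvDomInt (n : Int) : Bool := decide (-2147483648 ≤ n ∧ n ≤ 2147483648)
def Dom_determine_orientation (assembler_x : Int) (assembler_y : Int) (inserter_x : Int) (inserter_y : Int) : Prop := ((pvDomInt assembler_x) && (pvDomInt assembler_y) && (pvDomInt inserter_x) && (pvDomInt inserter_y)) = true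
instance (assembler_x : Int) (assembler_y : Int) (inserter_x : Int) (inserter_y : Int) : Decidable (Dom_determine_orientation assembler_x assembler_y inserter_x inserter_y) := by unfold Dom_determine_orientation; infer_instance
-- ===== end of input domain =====

-- B replaces A's dict of boundary coordinate lists and membership scan with direct offset arithmetic (objective: simpler).

-- ===== PORT A =====
-- scan of the dict's items in insertion order: first direction whose position list contains the inserter
def detOrientLoopA (inserter_x : Int) (inserter_y : Int) : List (String × List (Int × Int)) → Option String
  | [] => none
  | (direction, positions) :: rest =>
      if (inserter_x, inserter_y) ∈ positions then some direction
      else detOrientLoopA inserter_x inserter_y rest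

def determine_orientation (assembler_x : Int) (assembler_y : Int) (inserter_x : Int) (inserter_y : Int) : Option String :=
  let assembler_boundary : List (String × List (Int × Int)) :=
    [ ("left",  (List.range 3).map (fun i => (assembler_x - 1, assembler_y + (i : Int)))),
      ("right", (List.range 3).map (fun i => (assembler_x + 3, assembler_y + (i : Int)))),
      ("up",    (List.range 3).map (fun i => (assembler_x + (i : Int), assembler_y - 1))),
      ("down",  (List.range 3).map (fun i => (assembler_x + (i : Int), assembler_y + 3))) ]
  detOrientLoopA inserter_x inserter_y assembler_boundary

-- ===== PORT B =====
def determine_orientation_alt (assembler_x : Int) (assembler_y : Int) (inserter_x : Int) (inserter_y : Int) : Option String :=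
  let dx := inserter_x - assembler_x
  let dy := inserter_y - assembler_y
  if dx = -1 ∧ 0 ≤ dy ∧ dy ≤ 2 then some "left"
  else if dx = 3 ∧ 0 ≤ dy ∧ dy ≤ 2 then some "right"
  else if dy = -1 ∧ 0 ≤ dx ∧ dx ≤ 2 then some "up"
  else if dy = 3 ∧ 0 ≤ dx ∧ dx ≤ 2 then some "down"
  else none

-- ===== PRECONDITION & SPEC =====
def Spec_determine_orientation (assembler_x : Int) (assembler_y : Int) (inserter_x : Int) (inserter_y : Int) (out : Option String) : Prop := out = determine_orientation_alt assembler_x assembler_y inserter_x inserter_y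
instance (assembler_x : Int) (assembler_y : Int) (inserter_x : Int) (inserter_y : Int) (out : Option String) : Decidable (Spec_determine_orientation assembler_x assembler_y inserter_x inserter_y out) := by unfold Spec_determine_orientation; infer_instance

-- ===== CLAIM =====
def Claim_equal_determine_orientation : Prop := ∀ (assembler_x : Int) (assembler_y : Int) (inserter_x : Int) (inserter_y : Int), Dom_determine_orientation assembler_x assembler_y inserter_x inserter_y → Spec_determine_orientation assembler_x assembler_y inserter_x inserter_y (determine_orientation assembler_x assembler_y inserter_x inserter_y)

-- ===== LEMMAS AND PROOFS =====

-- ===== VERDICT =====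
theorem determine_orientation_spec : Claim_equal_determine_orientation := by
  intro ax ay ix iy _
  unfold Spec_determine_orientation determine_orientation determine_orientation_alt
  rw [show List.range 3 = [0, 1, 2] from rfl]
  simp only [detOrientLoopA]
  split_ifs <;> first | rfl | (simp_all [Prod.ext_iff]; omega)
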